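-- pv_equiv track=rewrite | github.com/Freskoko/BINF100 | excerices/needle/src/smith_refactor.py | get_max_score_indices
-- ===== SOURCE A (Python) =====
-- def get_max_score_indices(table: list[list[int]]) -> list[tuple[int,int]]:
--     """
--     Returns the indices of the maximum score(s) in the given table.
--     May return multiple
--
--     Args:
--         table (list): A 2D list representing the table of scores.
--
--     """
--     max_score = 0
--     max_indices = []
--
--     #find highest
--     for i in range(len(table)):
--         for j in range(len(table[0])):
--             if table[i][j] > max_score:
--                 max_score = table[i][j]
--
--     #find all indexes that contain max score
--     for i in range(len(table)):
--         for j in range(len(table[i])):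
--
--             if table[i][j] == max_score:
--                 max_indices.append( (i, j) )
--
--     return max_indices, max_score
-- ===== SOURCE B (Python) =====
-- def get_max_score_indices(table: list[list[int]]) -> list[tuple[int,int]]:
--     """Single fused pass: track the running max (init 0, like A) and its positions."""
--     max_score = 0
--     max_indices = []
--     for i, row in enumerate(table):
--         for j, v in enumerate(row):
--             if v > max_score:
--                 max_score = v
--                 max_indices = [(i, j)]
--             elif v == max_score:
--                 max_indices.append((i, j))
--     return max_indices, max_score
-- ===== Notes on version B (the rewrite author's own statement) =====
-- stated objective: simpler
-- what changed: Replaces A's two full passes (one to find the max, one to collect its positions) by a single fused pass that maintains the running max and resets/extends the index list as it goes.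
-- intended difference: On ragged tables whose extra cells (columns beyond the first row's width) contain a positive value exceeding every cell of the first len(table[0]) columns, A's first pass never sees that cell and returns the smaller clipped maximum with its positions, while B scans every cell and returns the true maximum with its positions, which is the intended result. — e.g. on get_max_score_indices([[0], [1, 2]]): A returns ([(1, 0)], 1), B returns ([(1, 1)], 2)
import Mathlib
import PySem

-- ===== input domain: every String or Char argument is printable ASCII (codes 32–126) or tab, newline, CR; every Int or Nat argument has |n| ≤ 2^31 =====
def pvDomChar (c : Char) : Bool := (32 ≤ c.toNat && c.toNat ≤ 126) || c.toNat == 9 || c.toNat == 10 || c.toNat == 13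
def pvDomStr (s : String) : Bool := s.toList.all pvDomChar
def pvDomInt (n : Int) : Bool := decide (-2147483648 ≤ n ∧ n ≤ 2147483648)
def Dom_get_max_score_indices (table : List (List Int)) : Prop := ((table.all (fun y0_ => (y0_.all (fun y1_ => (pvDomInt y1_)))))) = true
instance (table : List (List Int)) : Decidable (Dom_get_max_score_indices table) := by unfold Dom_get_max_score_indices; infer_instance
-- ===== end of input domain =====

-- B fuses A's two passes into one sweep that maintains the running max and its positions (objective: simpler).

-- ===== PORT A =====
-- range(…) is ported as PySem.List.pyRange, indexing as pyGetD (every index produced by the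
-- ranges is in range under Pre_, where pyGetD agrees with Python's table[i][j]).
def get_max_score_indices (table : List (List Int)) : (List (Int × Int)) × Int :=
  let max_score : Int :=
    (PySem.List.pyRange 0 (table.length : Int) 1).foldl (fun m i =>
      (PySem.List.pyRange 0 ((PySem.List.pyGetD table 0 []).length : Int) 1).foldl (fun m j =>
        if PySem.List.pyGetD (PySem.List.pyGetD table i []) j 0 > m then
          PySem.List.pyGetD (PySem.List.pyGetD table i []) j 0
        else m) m) 0
  let max_indices : List (Int × Int) :=
    (PySem.List.pyRange 0 (table.length : Int) 1).foldl (fun acc i =>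
      (PySem.List.pyRange 0 ((PySem.List.pyGetD table i []).length : Int) 1).foldl (fun acc j =>
        if PySem.List.pyGetD (PySem.List.pyGetD table i []) j 0 = max_score then
          acc ++ [(i, j)]
        else acc) acc) []
  (max_indices, max_score)

-- ===== PORT B =====
def get_max_score_indices_alt (table : List (List Int)) : (List (Int × Int)) × Int :=
  let st :=
    (PySem.List.enumerate table 0).foldl (fun st p =>
      (PySem.List.enumerate p.2 0).foldl (fun st q =>
        if q.2 > st.2 then ([(p.1, q.1)], q.2)
        else if q.2 = st.2 then (st.1 ++ [(p.1, q.1)], st.2)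
        else st) st) (([] : List (Int × Int)), (0 : Int))
  (st.1, st.2)

-- ===== PRECONDITION & SPEC =====
-- Pre_ excludes exactly the inputs on which A raises IndexError: tables with a row shorter
-- than the first row (A's first pass indexes every row up to len(table[0])).
def Pre_get_max_score_indices (table : List (List Int)) : Prop :=
  ∀ row ∈ table, (table.headD []).length ≤ row.length
instance (table : List (List Int)) : Decidable (Pre_get_max_score_indices table) := by
  unfold Pre_get_max_score_indices; infer_instance
def pvWitness_get_max_score_indices : List (List Int) := [[1, 2], [3, 2]]

-- On ragged tables whose extra cells (columns beyond the first row's width) contain a positive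
-- value exceeding every cell of the first len(table[0]) columns, A's first pass never sees that
-- cell and returns the smaller clipped maximum with its positions, while B scans every cell and
-- returns the true maximum with its positions, which is the intended result.
def D_get_max_score_indices (table : List (List Int)) : Prop :=
  ∃ row ∈ table, ∃ v ∈ row.drop (table.headD []).length,
    0 < v ∧ ∀ row' ∈ table, ∀ c ∈ row'.take (table.headD []).length, c < v
instance (table : List (List Int)) : Decidable (D_get_max_score_indices table) := by
  unfold D_get_max_score_indices; infer_instance

def Spec_get_max_score_indices (table : List (List Int)) (out : (List (Int × Int)) × Int) : Prop :=
  ¬ D_get_max_score_indices table → out = get_max_score_indices_alt table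
instance (table : List (List Int)) (out : (List (Int × Int)) × Int) : Decidable (Spec_get_max_score_indices table out) := by
  unfold Spec_get_max_score_indices; infer_instance

def pvDiffWitness_get_max_score_indices : List (List Int) := [[0], [1, 2]]
def pvDiffWitnessOut_get_max_score_indices : ((List (Int × Int)) × Int) × ((List (Int × Int)) × Int) :=
  (([(1, 0)], 1), ([(1, 1)], 2))

-- ===== CLAIM (what is proved, stated in full; the proofs are below) =====
def Claim_unchanged_get_max_score_indices : Prop := ∀ (table : List (List Int)), Dom_get_max_score_indices table → Pre_get_max_score_indices table → Spec_get_max_score_indices table (get_max_score_indices table)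
def Claim_changed_get_max_score_indices : Prop := Dom_get_max_score_indices (pvDiffWitness_get_max_score_indices) ∧ Pre_get_max_score_indices (pvDiffWitness_get_max_score_indices) ∧ D_get_max_score_indices (pvDiffWitness_get_max_score_indices) ∧ get_max_score_indices (pvDiffWitness_get_max_score_indices) = pvDiffWitnessOut_get_max_score_indices.1 ∧ get_max_score_indices_alt (pvDiffWitness_get_max_score_indices) = pvDiffWitnessOut_get_max_score_indices.2 ∧ pvDiffWitnessOut_get_max_score_indices.1 ≠ pvDiffWitnessOut_get_max_score_indices.2
def Claim_exact_get_max_score_indices : Prop := ∀ (table : List (List Int)), Dom_get_max_score_indices table → Pre_get_max_score_indices table → D_get_max_score_indices table → get_max_score_indices table ≠ get_max_score_indices_alt table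

-- ===== LEMMAS AND PROOFS =====

-- running max step: Python's 'if x > m: m = x'
def pvMxf (m x : Int) : Int := if x > m then x else m
-- all cells of the table with their (i, j) positions, row-major
def pvCells (table : List (List Int)) : List ((Int × Int) × Int) :=
  (PySem.List.enumerate table 0).flatMap
    (fun p => (PySem.List.enumerate p.2 0).map (fun q => ((p.1, q.1), q.2)))
-- the cell values A's FIRST pass scans: each row clipped to the first row's width
def pvClipVals (table : List (List Int)) : List Int :=
  (PySem.List.enumerate table 0).flatMap (fun p => p.2.take (table.headD []).length)
-- all cell values
def pvFullVals (table : List (List Int)) : List Int :=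
  (PySem.List.enumerate table 0).flatMap (fun p => p.2)
-- B's fused update on one cell
def pvStepB (st : (List (Int × Int)) × Int) (c : (Int × Int) × Int) : (List (Int × Int)) × Int :=
  if c.2 > st.2 then ([c.1], c.2) else if c.2 = st.2 then (st.1 ++ [c.1], st.2) else st

lemma le_foldl_pvMxf (l : List Int) (m : Int) : m ≤ l.foldl pvMxf m := by
  induction l generalizing m with
  | nil => simp
  | cons x l ih =>
    refine le_trans ?_ (ih (pvMxf m x))
    unfold pvMxf; split <;> omega

lemma mem_le_foldl_pvMxf (l : List Int) (m x : Int) (hx : x ∈ l) : x ≤ l.foldl pvMxf m := by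
  induction l generalizing m with
  | nil => cases hx
  | cons y l ih =>
    rcases List.mem_cons.1 hx with h | h
    · subst h
      refine le_trans ?_ (le_foldl_pvMxf l (pvMxf m x))
      unfold pvMxf; split <;> omega
    · exact ih (pvMxf m y) h

lemma foldl_pvMxf_le (l : List Int) (m K : Int) (hm : m ≤ K) (h : ∀ x ∈ l, x ≤ K) :
    l.foldl pvMxf m ≤ K := by
  induction l generalizing m with
  | nil => simpa
  | cons x l ih =>
    refine ih (pvMxf m x) ?_ (fun y hy => h y (List.mem_cons_of_mem _ hy))
    have := h x (List.mem_cons_self)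
    unfold pvMxf; split <;> omega

-- B's one pass over a flat cell list, characterised
lemma pvOnepass (l : List ((Int × Int) × Int)) (acc : List (Int × Int)) (m : Int) :
    l.foldl pvStepB (acc, m) =
      ((if (l.map (·.2)).foldl pvMxf m = m then acc else []) ++
        (l.filter (fun c => c.2 = (l.map (·.2)).foldl pvMxf m)).map (·.1),
       (l.map (·.2)).foldl pvMxf m) := by
  induction l generalizing acc m with
  | nil => simp
  | cons c l ih =>
    simp only [List.foldl_cons, List.map_cons, List.filter_cons]
    by_cases h1 : c.2 > m
    · have hst : pvStepB (acc, m) c = ([c.1], c.2) := by unfold pvStepB; simp [h1]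
      have hmx : pvMxf m c.2 = c.2 := by unfold pvMxf; simp [h1]
      rw [hst, ih]
      simp only [hmx]
      have hle := le_foldl_pvMxf (l.map (·.2)) c.2
      have hMm : ¬ ((l.map (·.2)).foldl pvMxf c.2 = m) := by omega
      by_cases h2 : c.2 = (l.map (·.2)).foldl pvMxf c.2
      · simp [← h2]
        intro h; exact absurd h (by omega)
      · simp [hMm, h2, show ¬ ((l.map (·.2)).foldl pvMxf c.2 = c.2) from fun hh => h2 hh.symm]
    · by_cases h2 : c.2 = m
      · have hst : pvStepB (acc, m) c = (acc ++ [c.1], m) := by unfold pvStepB; simp [h2]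
        have hmx : pvMxf m c.2 = m := by unfold pvMxf; simp [h1]
        rw [hst, ih]
        simp only [hmx]
        by_cases h3 : (l.map (·.2)).foldl pvMxf m = m
        · simp [h3, h2]
        · simp [h3, h2, show ¬ (m = (l.map (·.2)).foldl pvMxf m) by omega]
      · have hst : pvStepB (acc, m) c = (acc, m) := by unfold pvStepB; simp [h1, h2]
        have hmx : pvMxf m c.2 = m := by unfold pvMxf; simp [h1]
        rw [hst, ih]
        simp only [hmx]
        have := le_foldl_pvMxf (l.map (·.2)) m
        simp [show ¬ (c.2 = (l.map (·.2)).foldl pvMxf m) by omega]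

-- A equals the two-pass characterisation on flat lists (under Pre_)
lemma pvGetD_zero (table : List (List Int)) : PySem.List.pyGetD table 0 [] = table.headD [] := by
  cases table <;> simp [PySem.List.pyGetD, PySem.List.pyIdx?, PySem.List.pyGet?]

lemma pvLen_eq {α : Type} (xs : List α) : PySem.List.len xs = (xs.length : Int) := rfl

lemma pvCells_foldl {σ : Type} (table : List (List Int)) (F : σ → ((Int × Int) × Int) → σ) (init : σ) :
    (pvCells table).foldl F init =
      (PySem.List.pyRange 0 (table.length : Int) 1).foldl (fun s i =>
        (PySem.List.pyRange 0 ((PySem.List.pyGetD table i []).length : Int) 1).foldl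
          (fun s j => F s ((i, j), PySem.List.pyGetD (PySem.List.pyGetD table i []) j 0)) s) init := by
  unfold pvCells
  rw [List.foldl_flatMap, PySem.List.enumerate_eq_map_pyRange table [], List.foldl_map]
  apply PySem.List.foldl_congr_mem
  intro s i _
  rw [List.foldl_map, PySem.List.enumerate_eq_map_pyRange (PySem.List.pyGetD table i []) 0,
      List.foldl_map]
  rfl

-- the inner loop of A's first pass on one row, for a row of width ≥ W
lemma pvRow_clip_foldl (row : List Int) (W : Nat) (hW : W ≤ row.length) (m : Int) :
    (PySem.List.pyRange 0 (W : Int) 1).foldl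
      (fun m j => if PySem.List.pyGetD row j 0 > m then PySem.List.pyGetD row j 0 else m) m
    = (row.take W).foldl pvMxf m := by
  have hlen : (row.take W).length = W := by simp [hW]
  have h1 : (PySem.List.pyRange 0 (W : Int) 1).foldl
      (fun m j => if PySem.List.pyGetD row j 0 > m then PySem.List.pyGetD row j 0 else m) m
      = (PySem.List.pyRange 0 (W : Int) 1).foldl
      (fun m j => pvMxf m (PySem.List.pyGetD (row.take W) j 0)) m := by
    apply PySem.List.foldl_congr_mem
    intro acc j hj
    rcases (PySem.List.mem_pyRange_one).1 hj with ⟨hj0, hjW⟩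
    have e1 : PySem.List.pyGetD row j 0 = row[j.toNat]'(by omega) :=
      PySem.List.pyGetD_eq_getElem row 0 hj0 (by omega)
    have e2 : PySem.List.pyGetD (row.take W) j 0 = (row.take W)[j.toNat]'(by simp [hlen]; omega) :=
      PySem.List.pyGetD_eq_getElem (row.take W) 0 hj0 (by push_cast [hlen]; omega)
    have e3 : (row.take W)[j.toNat]'(by simp [hlen]; omega) = row[j.toNat]'(by omega) :=
      List.getElem_take
    rw [e1, e2, e3]; rfl
  rw [h1]
  have := PySem.List.foldl_pyRange_pyGetD' (row.take W) 0 pvMxf m (a := 0) le_rfl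
  simpa [hlen] using this

lemma pvA_max (table : List (List Int)) (hpre : Pre_get_max_score_indices table) :
    (PySem.List.pyRange 0 (table.length : Int) 1).foldl (fun m i =>
      (PySem.List.pyRange 0 ((PySem.List.pyGetD table 0 []).length : Int) 1).foldl (fun m j =>
        if PySem.List.pyGetD (PySem.List.pyGetD table i []) j 0 > m then
          PySem.List.pyGetD (PySem.List.pyGetD table i []) j 0
        else m) m) 0
    = (pvClipVals table).foldl pvMxf 0 := by
  unfold pvClipVals
  rw [List.foldl_flatMap, PySem.List.enumerate_eq_map_pyRange table [], List.foldl_map, pvLen_eq]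
  symm
  apply PySem.List.foldl_congr_mem
  intro m i hi
  rcases (PySem.List.mem_pyRange_one).1 hi with ⟨hi0, hiN⟩
  have hrow : PySem.List.pyGetD table i [] = table[i.toNat]'(by omega) :=
    PySem.List.pyGetD_eq_getElem table [] hi0 (by omega)
  have hmem : PySem.List.pyGetD table i [] ∈ table := by
    rw [hrow]; exact List.getElem_mem _
  have hW : (table.headD []).length ≤ (PySem.List.pyGetD table i []).length := hpre _ hmem
  rw [pvGetD_zero]
  exact (pvRow_clip_foldl _ _ hW m).symm

lemma pvA_idx (table : List (List Int)) (M : Int) :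
    (PySem.List.pyRange 0 (table.length : Int) 1).foldl (fun acc i =>
      (PySem.List.pyRange 0 ((PySem.List.pyGetD table i []).length : Int) 1).foldl (fun acc j =>
        if PySem.List.pyGetD (PySem.List.pyGetD table i []) j 0 = M then
          acc ++ [(i, j)]
        else acc) acc) []
    = ((pvCells table).filter (fun c => c.2 = M)).map (·.1) := by
  have h := pvCells_foldl table (fun acc c => if c.2 = M then acc ++ [c.1] else acc) []
  simp only [] at h
  rw [← h]
  have h2 := PySem.List.foldl_append_if (fun c : (Int × Int) × Int => decide (c.2 = M))
    (fun c : (Int × Int) × Int => c.1) (pvCells table) []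
  simp only [decide_eq_true_eq] at h2
  rw [h2, List.nil_append]

lemma pvA_char (table : List (List Int)) (hpre : Pre_get_max_score_indices table) :
    get_max_score_indices table =
      (((pvCells table).filter
          (fun c => c.2 = (pvClipVals table).foldl pvMxf 0)).map (·.1),
       (pvClipVals table).foldl pvMxf 0) := by
  simp only [get_max_score_indices]
  rw [pvA_max table hpre, pvA_idx table]

lemma pvB_cells (table : List (List Int)) :
    get_max_score_indices_alt table = (pvCells table).foldl pvStepB ([], 0) := by
  unfold get_max_score_indices_alt pvCells
  rw [List.foldl_flatMap]
  simp only [List.foldl_map]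
  rfl

lemma map_snd_pvCells (table : List (List Int)) :
    (pvCells table).map (·.2) = pvFullVals table := by
  unfold pvCells pvFullVals
  rw [List.map_flatMap]
  congr 1
  funext p
  rw [List.map_map]
  exact PySem.List.map_snd_enumerate p.2 0

lemma pvB_char (table : List (List Int)) :
    get_max_score_indices_alt table =
      (((pvCells table).filter
          (fun c => c.2 = (pvFullVals table).foldl pvMxf 0)).map (·.1),
       (pvFullVals table).foldl pvMxf 0) := by
  rw [pvB_cells, pvOnepass]
  rw [map_snd_pvCells]
  simp

lemma mem_pvClipVals (table : List (List Int)) (x : Int) :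
    x ∈ pvClipVals table ↔ ∃ row ∈ table, x ∈ row.take (table.headD []).length := by
  unfold pvClipVals
  rw [List.mem_flatMap]
  constructor
  · rintro ⟨p, hp, hx⟩
    refine ⟨p.2, ?_, hx⟩
    have := PySem.List.map_snd_enumerate (xs := table) (s := 0)
    exact this ▸ List.mem_map_of_mem hp
  · rintro ⟨row, hrow, hx⟩
    have : row ∈ (PySem.List.enumerate table 0).map (·.2) := by
      rw [PySem.List.map_snd_enumerate]; exact hrow
    rcases List.mem_map.1 this with ⟨p, hp, hpe⟩
    exact ⟨p, hp, hpe ▸ hx⟩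

lemma mem_pvFullVals (table : List (List Int)) (x : Int) :
    x ∈ pvFullVals table ↔ ∃ row ∈ table, x ∈ row := by
  unfold pvFullVals
  rw [List.mem_flatMap]
  constructor
  · rintro ⟨p, hp, hx⟩
    refine ⟨p.2, ?_, hx⟩
    have := PySem.List.map_snd_enumerate (xs := table) (s := 0)
    exact this ▸ List.mem_map_of_mem hp
  · rintro ⟨row, hrow, hx⟩
    have : row ∈ (PySem.List.enumerate table 0).map (·.2) := by
      rw [PySem.List.map_snd_enumerate]; exact hrow
    rcases List.mem_map.1 this with ⟨p, hp, hpe⟩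
    exact ⟨p, hp, hpe ▸ hx⟩

-- the two maxima agree outside D_ …
lemma pvMax_eq (table : List (List Int)) (hnd : ¬ D_get_max_score_indices table) :
    (pvClipVals table).foldl pvMxf 0 = (pvFullVals table).foldl pvMxf 0 := by
  unfold D_get_max_score_indices at hnd
  push Not at hnd
  apply le_antisymm
  · apply foldl_pvMxf_le _ _ _ (le_foldl_pvMxf _ _)
    intro x hx
    rcases (mem_pvClipVals table x).1 hx with ⟨row, hrow, hxr⟩
    exact mem_le_foldl_pvMxf _ _ _
      ((mem_pvFullVals table x).2 ⟨row, hrow, List.mem_of_mem_take hxr⟩)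
  · apply foldl_pvMxf_le _ _ _ (le_foldl_pvMxf _ _)
    intro x hx
    rcases (mem_pvFullVals table x).1 hx with ⟨row, hrow, hxr⟩
    rw [← List.take_append_drop (table.headD []).length row, List.mem_append] at hxr
    rcases hxr with h | h
    · exact mem_le_foldl_pvMxf _ _ _ ((mem_pvClipVals table x).2 ⟨row, hrow, h⟩)
    · rcases (by omega : x ≤ 0 ∨ 0 < x) with hx0 | hx0
      · exact le_trans hx0 (le_foldl_pvMxf _ _)
      · rcases hnd row hrow x h hx0 with ⟨row', hrow', c, hcmem, hxc⟩
        exact le_trans hxc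
          (mem_le_foldl_pvMxf _ _ _ ((mem_pvClipVals table c).2 ⟨row', hrow', hcmem⟩))

-- … and differ strictly inside D_
lemma pvMax_lt (table : List (List Int)) (hd : D_get_max_score_indices table) :
    (pvClipVals table).foldl pvMxf 0 < (pvFullVals table).foldl pvMxf 0 := by
  rcases hd with ⟨row, hrow, v, hv, hv0, hall⟩
  have h1 : (pvClipVals table).foldl pvMxf 0 ≤ v - 1 := by
    apply foldl_pvMxf_le _ _ _ (by omega)
    intro x hx
    rcases (mem_pvClipVals table x).1 hx with ⟨row', hrow', hxr⟩
    have := hall row' hrow' x hxr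
    omega
  have h2 : v ≤ (pvFullVals table).foldl pvMxf 0 :=
    mem_le_foldl_pvMxf _ _ _
      ((mem_pvFullVals table v).2 ⟨row, hrow, List.mem_of_mem_drop hv⟩)
  omega

-- ===== VERDICT (by name: the statement is the Claim_ definition above) =====
theorem get_max_score_indices_spec : Claim_unchanged_get_max_score_indices := by
  intro table _ hpre
  unfold Spec_get_max_score_indices
  intro hnd
  rw [pvA_char table hpre, pvB_char table, pvMax_eq table hnd]

theorem get_max_score_indices_changed : Claim_changed_get_max_score_indices := by
  unfold Claim_changed_get_max_score_indices; decide

theorem get_max_score_indices_tight : Claim_exact_get_max_score_indices := by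
  intro table _ hpre hd
  have h := pvMax_lt table hd
  rw [pvA_char table hpre, pvB_char table]
  intro hcontra
  have := congrArg Prod.snd hcontra
  simp at this
  omega
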